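-- pv_equiv track=rewrite | github.com/URAHASAM/compiladorers | rergregrgr.py | clasificar_lexema
-- ===== SOURCE A (Python) =====
-- def clasificar_subcomponentes(subcomponente):
--     if subcomponente.isalpha():
--         return "Cadena"
--     elif subcomponente.isdigit():
--         return "Numero"
--     else:
--         return "Simbolo"
--
-- def clasificar_lexema(lexema):
--     subcomponentes = []
--     subcomponente_actual = ""
--
--     for c in lexema:
--         if c.isalnum() or c == '.' or c in ('E', 'e', '+', '-'):
--             subcomponente_actual += c
--         else:
--             if subcomponente_actual:
--                 subcomponentes.append(subcomponente_actual)
--             subcomponente_actual = ""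
--             subcomponentes.append(c)
--
--     if subcomponente_actual:
--         subcomponentes.append(subcomponente_actual)
--
--     clasificaciones = [clasificar_subcomponentes(sub) for sub in subcomponentes]
--
--     return list(zip(subcomponentes, clasificaciones))
-- ===== SOURCE B (Python) =====
-- from itertools import groupby
--
-- def clasificar_subcomponentes(subcomponente):
--     if subcomponente.isalpha():
--         return "Cadena"
--     elif subcomponente.isdigit():
--         return "Numero"
--     else:
--         return "Simbolo"
--
-- def clasificar_lexema(lexema):
--     subcomponentes = []
--     for es_grupo, chars in groupby(lexema, key=lambda c: c.isalnum() or c == '.' or c in '+-Ee'):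
--         if es_grupo:
--             subcomponentes.append(''.join(chars))
--         else:
--             subcomponentes.extend(chars)
--     clasificaciones = [clasificar_subcomponentes(sub) for sub in subcomponentes]
--     return list(zip(subcomponentes, clasificaciones))
-- ===== Notes on version B (the rewrite author's own statement) =====
-- stated objective: idiomatic
-- what changed: Replaces A's character-by-character accumulator loop (mutable current-token string flushed on each delimiter) with an itertools.groupby run-grouping pass keyed on the token-character predicate: true-key runs are joined into one token, false-key runs extended as individual delimiter tokens.
import Mathlib
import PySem

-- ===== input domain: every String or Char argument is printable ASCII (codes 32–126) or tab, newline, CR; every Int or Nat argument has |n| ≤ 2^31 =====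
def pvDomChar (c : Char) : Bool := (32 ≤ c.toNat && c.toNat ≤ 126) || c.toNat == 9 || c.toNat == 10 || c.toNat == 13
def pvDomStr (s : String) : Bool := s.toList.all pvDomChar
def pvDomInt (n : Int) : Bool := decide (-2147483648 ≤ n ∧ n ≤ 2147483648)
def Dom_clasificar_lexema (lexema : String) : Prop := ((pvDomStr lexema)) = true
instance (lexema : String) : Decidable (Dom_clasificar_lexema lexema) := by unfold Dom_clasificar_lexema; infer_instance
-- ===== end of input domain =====

-- B restates A's accumulator loop as a run-grouping pass (groupby); same values, different decomposition (objective: idiomatic).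

-- ===== PORT A =====
-- c.isalnum() or c == '.' or c in ('E','e','+','-')   (PySem.Chars.isalnum is exact on ASCII)
def pvPred (c : Char) : Bool :=
  PySem.Chars.isalnum c || c == '.' || (c == 'E' || c == 'e' || c == '+' || c == '-')

-- clasificar_subcomponentes, via PySem.Str (exact on the ASCII domain)
def clasificar_subcomponentes (sub : String) : String :=
  if PySem.Str.strIsalpha sub then "Cadena"
  else if PySem.Str.strIsdigit sub then "Numero"
  else "Simbolo"

-- the for-loop of A, state = (subcomponentes, subcomponente_actual)
def pvLoopA : List Char → List String → List Char → List String
  | [], subs, cur => if cur = [] then subs else subs ++ [String.ofList cur]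
  | c :: cs, subs, cur =>
    if pvPred c then pvLoopA cs subs (cur ++ [c])
    else pvLoopA cs ((if cur = [] then subs else subs ++ [String.ofList cur]) ++ [String.ofList [c]]) []

def clasificar_lexema (lexema : String) : List (String × String) :=
  let subcomponentes := pvLoopA lexema.toList [] []
  let clasificaciones := subcomponentes.map clasificar_subcomponentes
  subcomponentes.zip clasificaciones

-- ===== PORT B =====
-- itertools.groupby over the key pvPred: a true-key run is joined into one token,
-- a false-key run is extended character by character
def pvTokens : List Char → List String
  | [] => []
  | c :: cs =>
    if pvPred c then
      String.ofList (c :: cs.takeWhile pvPred) :: pvTokens (cs.dropWhile pvPred)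
    else
      String.ofList [c] :: pvTokens cs
termination_by l => l.length
decreasing_by
  · simpa using Nat.lt_succ_of_le (List.length_dropWhile_le pvPred cs)
  · simp

def clasificar_lexema_alt (lexema : String) : List (String × String) :=
  (pvTokens lexema.toList).map (fun t => (t, clasificar_subcomponentes t))

-- ===== PRECONDITION & SPEC =====
def Spec_clasificar_lexema (lexema : String) (out : List (String × String)) : Prop := out = clasificar_lexema_alt lexema
instance (lexema : String) (out : List (String × String)) : Decidable (Spec_clasificar_lexema lexema out) := by unfold Spec_clasificar_lexema; infer_instance

-- ===== CLAIM (what is proved, stated in full; the proofs are below) =====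
def Claim_equal_clasificar_lexema : Prop := ∀ (lexema : String), Dom_clasificar_lexema lexema → Spec_clasificar_lexema lexema (clasificar_lexema lexema)

-- ===== LEMMAS AND PROOFS =====

-- combined loop invariant: a nonempty current token is extended by the next true-run,
-- an empty one just yields the remaining tokens
theorem pvLoopA_eq (cs : List Char) : ∀ (subs : List String) (cur : List Char),
    pvLoopA cs subs cur =
      if cur = [] then subs ++ pvTokens cs
      else subs ++ (String.ofList (cur ++ cs.takeWhile pvPred) :: pvTokens (cs.dropWhile pvPred)) := by
  induction cs with
  | nil =>
    intro subs cur
    by_cases h : cur = [] <;> simp [pvLoopA, pvTokens, h]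
  | cons c cs ih =>
    intro subs cur
    by_cases hp : pvPred c = true
    · simp only [pvLoopA, hp, if_pos]
      rw [ih subs (cur ++ [c])]
      by_cases h : cur = [] <;>
        simp [h, pvTokens, hp]
    · simp only [pvLoopA, hp]
      rw [if_neg (by simp [hp]), ih]
      by_cases h : cur = [] <;>
        simp [h, pvTokens, hp]

theorem zip_map_self {α β : Type} (f : α → β) (xs : List α) :
    xs.zip (xs.map f) = xs.map (fun x => (x, f x)) := by
  induction xs with
  | nil => rfl
  | cons x xs ih => simp [ih]

-- ===== VERDICT (by name: the statement is the Claim_ definition above) =====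
theorem clasificar_lexema_spec : Claim_equal_clasificar_lexema := by
  intro lexema _
  unfold Spec_clasificar_lexema clasificar_lexema clasificar_lexema_alt
  rw [pvLoopA_eq, if_pos rfl, List.nil_append, zip_map_self]
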